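-- pv_equiv track=rewrite | github.com/Oujox/aulos | src/mt/scale/processing/accidentals.py | fix_intervals
-- ===== SOURCE A (Python) =====
-- def fix_intervals(intervals: tuple[int], scale_intervals: tuple[int]) -> tuple[int]:
--
--     if len(intervals) > len(scale_intervals):
--         pass
--
--     if len(intervals) < len(scale_intervals):
--         _stopper = 0
--         _stepper = 0
--         _intervals = []
--         for i in range(len(scale_intervals)):
--             if len(intervals) <= i - _stopper:
--                 _intervals.append(0)
--                 _stepper = 0
--             elif sum(scale_intervals[i : i + _stepper + 1]) >= intervals[i - _stopper]:
--                 _intervals.append(intervals[i - _stopper])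
--                 _stepper = 0
--             else:
--                 _intervals.append(0)
--                 _stepper += 1
--                 _stopper += 1
--         return tuple(_intervals)
--
--     return intervals
-- ===== SOURCE B (Python) =====
-- def fix_intervals(intervals: tuple[int], scale_intervals: tuple[int]) -> tuple[int]:
--     # Sliding window: maintain the current window sum w incrementally instead of
--     # re-summing a slice, and a forward pointer j instead of i - _stopper arithmetic.
--     n = len(scale_intervals)
--     m = len(intervals)
--     if m >= n:
--         return intervals
--
--     def g(k):
--         return scale_intervals[k] if k < n else 0
--
--     out = []
--     j = 0
--     s = 0
--     w = g(0)  # invariant: w == sum(scale_intervals[i : i + s + 1]) at the top of the loop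
--     for i in range(n):
--         if j < m and w < intervals[j]:
--             out.append(0)
--             w += g(i + s + 1) + g(i + s + 2) - scale_intervals[i]
--             s += 1
--         else:
--             out.append(intervals[j] if j < m else 0)
--             j += 1
--             s = 0
--             w = g(i + 1)
--     return tuple(out)
-- ===== Notes on version B (the rewrite author's own statement) =====
-- stated objective: alternative
-- what changed: Replaces each in-loop slice re-summation with an incrementally maintained sliding-window sum (subtract the element leaving, add the one or two elements entering), and replaces the i - _stopper index arithmetic with a forward pointer j into intervals.
import Mathlib
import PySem

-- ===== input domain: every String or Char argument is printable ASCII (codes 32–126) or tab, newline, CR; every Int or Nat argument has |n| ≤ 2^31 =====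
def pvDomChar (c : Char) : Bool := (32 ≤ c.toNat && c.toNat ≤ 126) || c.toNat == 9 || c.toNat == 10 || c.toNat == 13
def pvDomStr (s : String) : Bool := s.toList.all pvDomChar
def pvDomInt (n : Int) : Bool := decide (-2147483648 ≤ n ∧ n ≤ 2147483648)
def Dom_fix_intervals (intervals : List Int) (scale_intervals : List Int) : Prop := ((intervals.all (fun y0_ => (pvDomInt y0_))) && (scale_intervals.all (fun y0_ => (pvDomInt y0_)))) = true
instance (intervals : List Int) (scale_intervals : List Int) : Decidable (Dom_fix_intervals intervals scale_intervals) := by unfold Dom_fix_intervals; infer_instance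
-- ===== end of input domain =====

-- B maintains the window sum as an incrementally updated sliding value (no slice
-- re-summing) and a forward pointer j in place of A's i - _stopper index arithmetic.

-- ===== PORT A =====
-- one loop step of A: state = (_stopper, _stepper, _intervals)
-- intervals[i - _stopper] is ported as pyGetD; it is exact because the first
-- branch guarantees 0 ≤ i - _stopper < len(intervals) whenever it is evaluated.
def fixStepA (intervals : List Int) (scale_intervals : List Int)
    (st : Int × Int × List Int) (i : Int) : Int × Int × List Int :=
  if (intervals.length : Int) ≤ i - st.1 then
    (st.1, 0, st.2.2 ++ [0])
  else if (PySem.List.slice scale_intervals (some i) (some (i + st.2.1 + 1))).sum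
          ≥ PySem.List.pyGetD intervals (i - st.1) 0 then
    (st.1, 0, st.2.2 ++ [PySem.List.pyGetD intervals (i - st.1) 0])
  else
    (st.1 + 1, st.2.1 + 1, st.2.2 ++ [0])

def fix_intervals (intervals : List Int) (scale_intervals : List Int) : List Int :=
  -- 'if len(intervals) > len(scale_intervals): pass' is a no-op and has no port
  if intervals.length < scale_intervals.length then
    ((PySem.List.pyRange 0 (scale_intervals.length : Int) 1).foldl
      (fixStepA intervals scale_intervals) (0, 0, [])).2.2
  else intervals

-- ===== PORT B =====
-- helper g(k): scale_intervals[k] if k < n else 0 (k is always ≥ 0 where used)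
def bGet (scale : List Int) (n : Int) (k : Int) : Int :=
  if k < n then PySem.List.pyGetD scale k 0 else 0

-- one loop step of B: state = (j, s, w, out)
def fixStepB (intervals : List Int) (scale : List Int) (n m : Int)
    (st : Int × Int × Int × List Int) (i : Int) : Int × Int × Int × List Int :=
  if st.1 < m ∧ st.2.2.1 < PySem.List.pyGetD intervals st.1 0 then
    (st.1, st.2.1 + 1,
     st.2.2.1 + bGet scale n (i + st.2.1 + 1) + bGet scale n (i + st.2.1 + 2)
       - PySem.List.pyGetD scale i 0,
     st.2.2.2 ++ [0])
  else
    (st.1 + 1, 0, bGet scale n (i + 1),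
     st.2.2.2 ++ [if st.1 < m then PySem.List.pyGetD intervals st.1 0 else 0])

def fix_intervals_alt (intervals : List Int) (scale_intervals : List Int) : List Int :=
  if intervals.length ≥ scale_intervals.length then intervals
  else
    ((PySem.List.pyRange 0 (scale_intervals.length : Int) 1).foldl
      (fixStepB intervals scale_intervals (scale_intervals.length : Int) (intervals.length : Int))
      (0, 0, bGet scale_intervals (scale_intervals.length : Int) 0, [])).2.2.2

-- ===== PRECONDITION & SPEC =====
def Spec_fix_intervals (intervals : List Int) (scale_intervals : List Int) (out : List Int) : Prop := out = fix_intervals_alt intervals scale_intervals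
instance (intervals : List Int) (scale_intervals : List Int) (out : List Int) : Decidable (Spec_fix_intervals intervals scale_intervals out) := by unfold Spec_fix_intervals; infer_instance

-- ===== CLAIM (what is proved, stated in full; the proofs are below) =====
def Claim_equal_fix_intervals : Prop := ∀ (intervals : List Int) (scale_intervals : List Int), Dom_fix_intervals intervals scale_intervals → Spec_fix_intervals intervals scale_intervals (fix_intervals intervals scale_intervals)

-- ===== LEMMAS AND PROOFS =====

-- prefix sum of the first k elements (proof-only abbreviation; take clamps, so no min needed)
def P (xs : List Int) (k : Nat) : Int := (xs.take k).sum

lemma P_succ (xs : List Int) (k : Nat) (h : k < xs.length) :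
    P xs (k + 1) = P xs k + xs[k] := by
  simp [P, List.sum_take_succ xs k h]

lemma P_clamp (xs : List Int) (k : Nat) (h : xs.length ≤ k) : P xs k = P xs xs.length := by
  simp [P, List.take_of_length_le h]

lemma gP (xs : List Int) (k : Nat) :
    bGet xs (xs.length : Int) ((k : Nat) : Int) = P xs (k + 1) - P xs k := by
  unfold bGet
  by_cases hk : k < xs.length
  · rw [if_pos (by exact_mod_cast hk), PySem.List.pyGetD_natCast, P_succ xs k hk]
    simp [List.getD, List.getElem?_eq_getElem hk]
  · rw [if_neg (by omega), P_clamp xs k (by omega), P_clamp xs (k + 1) (by omega)]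
    ring

lemma drop_take_sum (xs : List Int) (i t : Nat) (_h : i ≤ xs.length) :
    ((xs.drop i).take t).sum = P xs (i + t) - P xs i := by
  by_cases hit : i + t ≤ xs.length
  · rw [P, P, List.take_add, List.sum_append]
    ring
  · have h1 : (xs.drop i).take t = xs.drop i := List.take_of_length_le (by simp; omega)
    have h2 : (xs.take i).sum + (xs.drop i).sum = xs.sum := by
      rw [← List.sum_append, List.take_append_drop]
    rw [h1, P_clamp xs (i + t) (by omega)]
    simp only [P, List.take_length]
    linarith

lemma slice_sum_P (xs : List Int) (k s : Nat) (hk : k ≤ xs.length) :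
    (PySem.List.slice xs (some ((k : Nat) : Int)) (some ((k : Nat) + (s : Nat) + 1))).sum
      = P xs (k + s + 1) - P xs k := by
  rw [PySem.List.slice_toNat xs (by omega) (by omega)]
  have h1 : ((k : Int)).toNat = k := by omega
  have h2 : ((k : Int) + (s : Int) + 1).toNat = k + s + 1 := by omega
  rw [h1, h2, (show k + s + 1 - k = s + 1 by omega), drop_take_sum xs k (s + 1) hk,
    ← Nat.add_assoc]

lemma loop_eq (iv sc : List Int) :
    ∀ (d k : Nat) (stopper : Int) (s : Nat) (acc : List Int),
      k + d = sc.length →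
      ((PySem.List.pyRange (k : Int) (sc.length : Int) 1).foldl
          (fixStepA iv sc) (stopper, (s : Int), acc)).2.2
        = ((PySem.List.pyRange (k : Int) (sc.length : Int) 1).foldl
            (fixStepB iv sc (sc.length : Int) (iv.length : Int))
            ((k : Int) - stopper, (s : Int), P sc (k + s + 1) - P sc k, acc)).2.2.2 := by
  intro d
  induction d with
  | zero =>
    intro k stopper s acc hk
    rw [PySem.List.pyRange_one_eq_nil (by omega)]
    rfl
  | succ d ih =>
    intro k stopper s acc hk
    have hkn : k < sc.length := by omega
    rw [PySem.List.pyRange_one_cons (by exact_mod_cast hkn)]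
    simp only [List.foldl_cons, fixStepA, fixStepB]
    have hslice := slice_sum_P sc k s (by omega)
    have hgk1 : bGet sc (sc.length : Int) ((k : Int) + 1)
        = P sc (k + 2) - P sc (k + 1) := by
      have h := gP sc (k + 1)
      rw [show (k : Int) + 1 = (((k + 1 : Nat)) : Int) by push_cast; ring, h]
    have hsck : PySem.List.pyGetD sc (k : Int) 0 = P sc (k + 1) - P sc k := by
      rw [PySem.List.pyGetD_natCast, P_succ sc k hkn]
      simp [List.getD, List.getElem?_eq_getElem hkn]
    by_cases hj : (iv.length : Int) ≤ (k : Int) - stopper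
    · rw [if_pos hj, if_neg (by omega), if_neg (by omega), hgk1]
      have := ih (k + 1) stopper 0 (acc ++ [0]) (by omega)
      push_cast at this ⊢
      rw [show (k : Int) + 1 - stopper = (k : Int) - stopper + 1 by ring] at this
      simpa using this
    · by_cases hge : (PySem.List.slice sc (some (k : Int)) (some ((k : Int) + (s : Int) + 1))).sum
          ≥ PySem.List.pyGetD iv ((k : Int) - stopper) 0
      · rw [if_neg (by omega), if_pos hge,
          if_neg (by rw [hslice] at hge; rintro ⟨_, h2⟩; omega),
          if_pos (by omega), hgk1]
        have := ih (k + 1) stopper 0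
          (acc ++ [PySem.List.pyGetD iv ((k : Int) - stopper) 0]) (by omega)
        push_cast at this ⊢
        rw [show (k : Int) + 1 - stopper = (k : Int) - stopper + 1 by ring] at this
        simpa using this
      · rw [if_neg (by omega), if_neg hge,
          if_pos ⟨by omega, by rw [← hslice]; omega⟩]
        have hg1 : bGet sc (sc.length : Int) ((k : Int) + (s : Int) + 1)
            = P sc (k + s + 2) - P sc (k + s + 1) := by
          have h := gP sc (k + s + 1)
          rw [show (((k + s + 1 : Nat)) : Int) = (k : Int) + (s : Int) + 1 by push_cast; ring] at h
          rw [h]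
        have hg2 : bGet sc (sc.length : Int) ((k : Int) + (s : Int) + 2)
            = P sc (k + s + 3) - P sc (k + s + 2) := by
          have h := gP sc (k + s + 2)
          rw [show (((k + s + 2 : Nat)) : Int) = (k : Int) + (s : Int) + 2 by push_cast; ring] at h
          rw [h]
        rw [hg1, hg2, hsck,
          show P sc (k + s + 1) - P sc k
              + (P sc (k + s + 2) - P sc (k + s + 1))
              + (P sc (k + s + 3) - P sc (k + s + 2))
              - (P sc (k + 1) - P sc k)
            = P sc (k + s + 3) - P sc (k + 1) by ring]
        have := ih (k + 1) (stopper + 1) (s + 1) (acc ++ [0]) (by omega)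
        push_cast at this ⊢
        rw [show (k : Int) + 1 - (stopper + 1) = (k : Int) - stopper by ring,
          show k + 1 + (s + 1) + 1 = k + s + 3 by omega] at this
        simpa using this

-- ===== VERDICT (by name: the statement is the Claim_ definition above) =====
theorem fix_intervals_spec : Claim_equal_fix_intervals := by
  intro iv sc _
  unfold Spec_fix_intervals fix_intervals fix_intervals_alt
  by_cases h : iv.length < sc.length
  · rw [if_pos h, if_neg (by omega)]
    have hinit : bGet sc (sc.length : Int) 0 = P sc (0 + 0 + 1) - P sc 0 := by
      have := gP sc 0
      simpa [P] using this
    have := loop_eq iv sc sc.length 0 0 0 [] (by omega)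
    rw [hinit]
    simpa using this
  · rw [if_neg h, if_pos (by omega)]
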